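-- pv_equiv track=rewrite | github.com/ComradeRyn/MMS-Calculator | code/Old Code/MMSCalculator.py | FindIntegerPartition
-- ===== SOURCE A (Python) =====
-- def FindIntegerPartition(n, k, max_val=None):
--     """
--     Generates all integer partitions of 'n' into exactly 'k' parts.
--
--     Args:
--         n (int): The integer to partition.
--         k (int): The desired number of parts in each partition.
--         max_val (int, optional): The maximum value allowed for a part in the partition.
--                                  Defaults to 'n' if not provided.
--
--     Yields:
--         tuple: A tuple representing an integer partition of 'n' into 'k' parts.
--     """
--     if max_val is None:
--         max_val = n
--
--     if k == 0:
--         if n == 0: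
--             yield ()  # Base case: if n and k are both 0, an empty tuple is a valid partition
--         return
--
--     if n <= 0 or k <= 0:
--         return
--
--     # Iterate through possible values for the first part
--     # The value can range from 1 up to min(n, max_val)
--     for first_part in range(1, min(n, max_val) + 1):
--         # Recursively find partitions for the remaining sum (n - first_part)
--         # with one less part (k - 1) and a new max_val (first_part)
--         # to ensure parts are non-increasing (or non-decreasing, depending on desired order)
--         for rest_of_partition in FindIntegerPartition(n - first_part, k - 1, first_part):
--             yield (first_part,) + rest_of_partition
-- ===== SOURCE B (Python) =====
-- def FindIntegerPartition(n, k, max_val=None):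
--     """Iterative level-by-level expansion with exact feasibility pruning:
--     no recursion, and no first part is ever tried that cannot be completed."""
--     if max_val is None:
--         max_val = n
--     if k == 0:
--         return [()] if n == 0 else []
--     if n <= 0 or k <= 0:
--         return []
--     states = [((), n, max_val)]        # (prefix, remaining sum, cap on next part)
--     for parts in range(k, 0, -1):
--         if not states:
--             break
--         new_states = []
--         for prefix, rem, cap in states:
--             lo = -(-rem // parts)              # smallest feasible part: ceil(rem/parts)
--             hi = min(cap, rem - parts + 1)     # leave at least 1 for each remaining part
--             for p in range(lo, hi + 1):
--                 new_states.append((prefix + (p,), rem - p, p))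
--         states = new_states
--     return [prefix for prefix, rem, cap in states]
-- ===== Notes on version B (the rewrite author's own statement) =====
-- stated objective: alternative
-- what changed: B replaces A's recursion by an iterative level-by-level expansion of prefix states and prunes each loop to the exact feasible window [ceil(rem/parts), min(cap, rem-parts+1)], so no state is ever expanded that cannot be completed.
-- outside the precondition, e.g. on FindIntegerPartition(10000, 10001, 1): A raises RecursionError, B returns []
import Mathlib
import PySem

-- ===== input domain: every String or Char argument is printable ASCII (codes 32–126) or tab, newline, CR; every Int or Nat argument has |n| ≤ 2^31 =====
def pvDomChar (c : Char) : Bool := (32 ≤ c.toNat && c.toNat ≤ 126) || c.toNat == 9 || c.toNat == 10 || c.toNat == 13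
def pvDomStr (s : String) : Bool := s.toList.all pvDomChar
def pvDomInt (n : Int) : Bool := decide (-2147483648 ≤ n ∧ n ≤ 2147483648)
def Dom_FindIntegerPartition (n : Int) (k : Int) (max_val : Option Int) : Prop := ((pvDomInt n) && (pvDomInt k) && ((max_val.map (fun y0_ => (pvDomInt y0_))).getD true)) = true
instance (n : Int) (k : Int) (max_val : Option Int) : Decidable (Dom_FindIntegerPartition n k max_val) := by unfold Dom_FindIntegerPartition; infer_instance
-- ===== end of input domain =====

-- B replaces A's recursive suffix enumeration by an iterative level-by-level expansion of
-- prefix states, pruning each loop to the exact feasible window of next parts.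

-- ===== PORT A =====
def FindIntegerPartition (n : Int) (k : Int) (max_val : Option Int) : List (List Int) :=
  let mv := max_val.getD n
  if _hk : k = 0 then (if n = 0 then [[]] else [])
  else if _hnk : n ≤ 0 ∨ k ≤ 0 then []
  else
    (PySem.List.pyRange 1 (min n mv + 1) 1).flatMap
      (fun first_part =>
        (FindIntegerPartition (n - first_part) (k - 1) (some first_part)).map
          (fun rest => first_part :: rest))
termination_by k.toNat
decreasing_by omega

-- ===== PORT B =====
-- one pass of Source B's `for prefix, rem, cap in states` body (builds new_states by appends)
def pvExpand (parts : Int) (states : List (List Int × Int × Int)) :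
    List (List Int × Int × Int) :=
  states.foldl (fun acc s =>
    let lo := -(PySem.Int.floordiv (-s.2.1) parts)
    let hi := min s.2.2 (s.2.1 - parts + 1)
    (PySem.List.pyRange lo (hi + 1) 1).foldl
      (fun acc2 p => acc2 ++ [(s.1 ++ [p], s.2.1 - p, p)]) acc) []

-- Source B's `for parts in range(k, 0, -1)` loop with its `if not states: break`;
-- the fuel counts the remaining iterations, so the current `parts` value is the fuel itself
def pvLevels (fuel : Nat) (states : List (List Int × Int × Int)) :
    List (List Int × Int × Int) :=
  match fuel with
  | 0 => states
  | j + 1 => if states = [] then states else pvLevels j (pvExpand ((j : Int) + 1) states)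

def FindIntegerPartition_alt (n : Int) (k : Int) (max_val : Option Int) : List (List Int) :=
  let mv := max_val.getD n
  if k = 0 then (if n = 0 then [[]] else [])
  else if n ≤ 0 ∨ k ≤ 0 then []
  else (pvLevels k.toNat [([], n, mv)]).map (fun s => s.1)

-- ===== PRECONDITION & SPEC =====
-- Pre_ excludes only inputs with n ≥ 9950, k ≥ 9950 and a positive effective cap: there A's
-- leftmost recursion chain (first_part = 1 at every level) is min(n, k) ≥ 9950 frames deep,
-- at — or within a small safety margin of — CPython's recursion limit, so A raises
-- RecursionError instead of returning; every other input is admitted.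
def Pre_FindIntegerPartition (n : Int) (k : Int) (max_val : Option Int) : Prop :=
  ¬ (9950 ≤ n ∧ 9950 ≤ k ∧ 1 ≤ max_val.getD n)
instance (n : Int) (k : Int) (max_val : Option Int) : Decidable (Pre_FindIntegerPartition n k max_val) := by unfold Pre_FindIntegerPartition; infer_instance
def pvWitness_FindIntegerPartition : Int × Int × Option Int := (6, 3, none)

def Spec_FindIntegerPartition (n : Int) (k : Int) (max_val : Option Int) (out : List (List Int)) : Prop := out = FindIntegerPartition_alt n k max_val
instance (n : Int) (k : Int) (max_val : Option Int) (out : List (List Int)) : Decidable (Spec_FindIntegerPartition n k max_val out) := by unfold Spec_FindIntegerPartition; infer_instance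

-- ===== CLAIM (what is proved, stated in full; the proofs are below) =====
def Claim_equal_FindIntegerPartition : Prop := ∀ (n : Int) (k : Int) (max_val : Option Int), Dom_FindIntegerPartition n k max_val → Pre_FindIntegerPartition n k max_val → Spec_FindIntegerPartition n k max_val (FindIntegerPartition n k max_val)

-- ===== LEMMAS AND PROOFS =====

-- A's max_val defaulting: only max_val.getD n matters
theorem pvA_getD (n k : Int) (max_val : Option Int) :
    FindIntegerPartition n k max_val = FindIntegerPartition n k (some (max_val.getD n)) := by
  cases max_val with
  | none =>
    rw [FindIntegerPartition]
    conv_rhs => rw [FindIntegerPartition]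
    simp
  | some mv => rfl

-- infeasible calls of A return []
theorem pvA_nil : ∀ (jn : Nat) (j m mv : Int), j = (jn : Int) →
    (m < j ∨ j * mv < m) → FindIntegerPartition m j (some mv) = [] := by
  intro jn
  induction jn with
  | zero =>
    intro j m mv hj hcond
    subst hj
    rw [FindIntegerPartition]
    have : m ≠ 0 := by omega
    simp [this]
  | succ p ih =>
    intro j m mv hj hcond
    subst hj
    rw [FindIntegerPartition]
    rw [dif_neg (by push_cast; omega)]
    by_cases hm : m ≤ 0 ∨ ((p + 1 : Nat) : Int) ≤ 0
    · rw [dif_pos hm]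
    · rw [dif_neg hm]
      apply List.flatMap_eq_nil_iff.2
      intro f hf
      rcases (PySem.List.mem_pyRange_one).1 hf with ⟨hf1, hf2⟩
      have hcall : FindIntegerPartition (m - f) ((p : Nat) : Int) (some f) = [] := by
        apply ih _ _ _ rfl
        rcases hcond with h | h
        · left; push_cast at h ⊢; omega
        · right
          have hfm : f ≤ mv := by
            simp only [Option.getD_some] at hf2
            omega
          have hmul : ((p : Int)) * f ≤ (p : Int) * mv :=
            mul_le_mul_of_nonneg_left hfm (by positivity)
          push_cast at h ⊢
          nlinarith
      simp [hcall]

-- the ceiling bracket for lo = -((-rem) // parts), parts > 0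
theorem pvCeil (rem parts : Int) (hp : 0 < parts) :
    (-(PySem.Int.floordiv (-rem) parts) - 1) * parts < rem ∧
      rem ≤ -(PySem.Int.floordiv (-rem) parts) * parts :=
  (PySem.Int.neg_floordiv_neg_eq_iff_of_pos hp).1 rfl

theorem pvFlatMap_single {α β : Type} (l : List α) (f : α → β) :
    l.flatMap (fun x => [f x]) = l.map f := by
  induction l with
  | nil => rfl
  | cons x xs ih => simp [ih]

theorem pvFlatMap_congr {α β : Type} (l : List α) (f g : α → List β)
    (h : ∀ x ∈ l, f x = g x) : l.flatMap f = l.flatMap g := by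
  induction l with
  | nil => rfl
  | cons x xs ih =>
    simp only [List.flatMap_cons]
    rw [h x (by simp), ih (fun y hy => h y (by simp [hy]))]

-- shrink a flatMap over [1, M+1) to [lo, hi+1) when h is [] outside [lo, hi]
theorem pvShrink {α : Type} (h : Int → List α) (M lo hi : Int)
    (h1 : 1 ≤ lo) (h2 : hi ≤ M)
    (hz : ∀ x, 1 ≤ x → x ≤ M → (x < lo ∨ hi < x) → h x = []) :
    (PySem.List.pyRange 1 (M + 1) 1).flatMap h
      = (PySem.List.pyRange lo (hi + 1) 1).flatMap h := by
  by_cases hle : lo ≤ hi + 1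
  · rw [PySem.List.pyRange_one_append 1 lo (M + 1) h1 (by omega),
        PySem.List.pyRange_one_append lo (hi + 1) (M + 1) hle (by omega),
        List.flatMap_append, List.flatMap_append]
    have e1 : (PySem.List.pyRange 1 lo 1).flatMap h = [] := by
      apply List.flatMap_eq_nil_iff.2
      intro x hx
      rcases (PySem.List.mem_pyRange_one).1 hx with ⟨hxa, hxb⟩
      exact hz x hxa (by omega) (by omega)
    have e2 : (PySem.List.pyRange (hi + 1) (M + 1) 1).flatMap h = [] := by
      apply List.flatMap_eq_nil_iff.2
      intro x hx
      rcases (PySem.List.mem_pyRange_one).1 hx with ⟨hxa, hxb⟩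
      exact hz x (by omega) (by omega) (by omega)
    rw [e1, e2]
    simp
  · rw [PySem.List.pyRange_one_eq_nil (by omega : hi + 1 ≤ lo)]
    simp only [List.flatMap_nil]
    apply List.flatMap_eq_nil_iff.2
    intro x hx
    rcases (PySem.List.mem_pyRange_one).1 hx with ⟨hxa, hxb⟩
    exact hz x hxa (by omega) (by omega)

-- one expansion pass as a flatMap of per-state windows
theorem pvExpand_eq (parts : Int) (states : List (List Int × Int × Int)) :
    pvExpand parts states
      = states.flatMap (fun s =>
          (PySem.List.pyRange (-(PySem.Int.floordiv (-s.2.1) parts))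
              (min s.2.2 (s.2.1 - parts + 1) + 1) 1).map
            (fun p => (s.1 ++ [p], s.2.1 - p, p))) := by
  unfold pvExpand
  rw [PySem.List.foldl_congr_mem _ _
      (fun acc s => acc ++
        (PySem.List.pyRange (-(PySem.Int.floordiv (-s.2.1) parts))
            (min s.2.2 (s.2.1 - parts + 1) + 1) 1).map
          (fun p => (s.1 ++ [p], s.2.1 - p, p))) _
      (by
        intro acc s _
        simp only []
        rw [show (fun (acc2 : List (List Int × Int × Int)) (p : Int) =>
              acc2 ++ [(s.1 ++ [p], s.2.1 - p, p)])
            = (fun acc2 p => acc2 ++ (fun q => [(s.1 ++ [q], s.2.1 - q, q)]) p) from rfl]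
        rw [PySem.List.foldl_append_eq_flatMap]
        congr 1
        rw [pvFlatMap_single]),
    PySem.List.foldl_append_eq_flatMap]
  simp

theorem pvLevels_nil : ∀ j : Nat, pvLevels j [] = [] := by
  intro j
  cases j <;> simp [pvLevels]

-- the per-state core: the pruned window yields exactly A's partitions of (rem, parts+1, cap)
theorem pvState (j : Nat) (rem cap : Int) (pre : List Int) (hrem : (j : Int) + 1 ≤ rem) :
    (PySem.List.pyRange (-(PySem.Int.floordiv (-rem) ((j : Int) + 1)))
        (min cap (rem - ((j : Int) + 1) + 1) + 1) 1).flatMap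
      (fun p => (FindIntegerPartition (rem - p) ((j : Int)) (some p)).map
        (fun r => (pre ++ [p]) ++ r))
      = (FindIntegerPartition rem ((j : Int) + 1) (some cap)).map (fun r => pre ++ r) := by
  have hp1 : (0:Int) < (j : Int) + 1 := by positivity
  obtain ⟨hceil1, hceil2⟩ := pvCeil rem ((j : Int) + 1) hp1
  set lo := -(PySem.Int.floordiv (-rem) ((j : Int) + 1)) with hlo
  set hi := min cap (rem - ((j : Int) + 1) + 1) with hhi
  have hlo1 : 1 ≤ lo := by nlinarith
  conv_rhs => rw [FindIntegerPartition]
  rw [dif_neg (by omega), dif_neg (by omega)]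
  simp only [Option.getD_some, List.map_flatMap, List.map_map, Function.comp_def,
    add_sub_cancel_right]
  rw [pvFlatMap_congr (PySem.List.pyRange lo (hi + 1) 1) _
      (fun q => (FindIntegerPartition (rem - q) ((j : Int)) (some q)).map
        (fun rest => pre ++ q :: rest))
      (by
        intro q _
        apply List.map_congr_left
        intro r _
        simp)]
  refine (pvShrink (fun q => (FindIntegerPartition (rem - q) ((j : Int)) (some q)).map
      (fun rest => pre ++ q :: rest)) (min rem cap) lo hi hlo1 (by omega) ?_).symm
  intro f hfa hfb hout
  have hnil : FindIntegerPartition (rem - f) ((j : Int)) (some f) = [] := by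
    apply pvA_nil j ((j : Int)) (rem - f) f rfl
    rcases hout with hlt | hgt
    · right
      have hfle : f ≤ lo - 1 := by omega
      have : f * ((j : Int) + 1) ≤ (lo - 1) * ((j : Int) + 1) :=
        mul_le_mul_of_nonneg_right hfle (by omega)
      nlinarith
    · left
      have hcap : f ≤ cap := by omega
      omega
  simp [hnil]

-- main invariant: the prefixes after j more levels are A's partitions glued to each prefix
theorem pvLevels_eq : ∀ (j : Nat) (states : List (List Int × Int × Int)),
    (∀ s ∈ states, (j : Int) ≤ s.2.1 ∧ s.2.1 ≤ (j : Int) * s.2.2) →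
    (pvLevels j states).map (fun s => s.1)
      = states.flatMap (fun s =>
          (FindIntegerPartition s.2.1 ((j : Int)) (some s.2.2)).map (fun r => s.1 ++ r)) := by
  intro j
  induction j with
  | zero =>
    intro states hinv
    rw [pvLevels]
    rw [pvFlatMap_congr states _ (fun s => [s.1])
        (by
          intro s hs
          obtain ⟨h1, h2⟩ := hinv s hs
          have hz : s.2.1 = 0 := by push_cast at h1 h2; omega
          rw [FindIntegerPartition]
          simp [hz])]
    rw [pvFlatMap_single]
  | succ p ih =>
    intro states hinv
    rw [pvLevels]
    by_cases hs : states = []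
    · subst hs; simp
    · rw [if_neg hs]
      rw [ih (pvExpand ((p : Int) + 1) states)
          (by
            intro s' hs'
            rw [pvExpand_eq] at hs'
            rcases List.mem_flatMap.1 hs' with ⟨s, hsmem, hs'mem⟩
            rcases List.mem_map.1 hs'mem with ⟨q, hqmem, hq⟩
            rcases (PySem.List.mem_pyRange_one).1 hqmem with ⟨hq1, hq2⟩
            obtain ⟨hi1, hi2⟩ := hinv s hsmem
            obtain ⟨hc1, hc2⟩ := pvCeil s.2.1 ((p : Int) + 1) (by positivity)
            subst hq
            refine ⟨show ((p : Nat) : Int) ≤ s.2.1 - q by omega,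
              show s.2.1 - q ≤ ((p : Nat) : Int) * q from ?_⟩
            have : s.2.1 ≤ q * ((p : Int) + 1) := by
              have := mul_le_mul_of_nonneg_right
                (show -(PySem.Int.floordiv (-s.2.1) ((p : Int) + 1)) ≤ q by omega)
                (show (0:Int) ≤ (p : Int) + 1 by positivity)
              nlinarith
            nlinarith)]
      rw [pvExpand_eq, List.flatMap_assoc]
      apply pvFlatMap_congr
      intro s hsmem
      rw [List.flatMap_map]
      have hrem : ((p : Nat) : Int) + 1 ≤ s.2.1 := by
        obtain ⟨h1, _⟩ := hinv s hsmem
        push_cast at h1 ⊢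
        omega
      have := pvState p s.2.1 s.2.2 s.1 hrem
      simp only [Nat.cast_add, Nat.cast_one]
      rw [← this]

-- ===== VERDICT (by name: the statement is the Claim_ definition above) =====
theorem FindIntegerPartition_spec : Claim_equal_FindIntegerPartition := by
  intro n k max_val _ _
  unfold Spec_FindIntegerPartition
  rw [pvA_getD]
  unfold FindIntegerPartition_alt
  by_cases hk : k = 0
  · rw [FindIntegerPartition]
    simp [hk]
  · by_cases hnk : n ≤ 0 ∨ k ≤ 0
    · rw [if_neg hk, if_pos hnk, FindIntegerPartition, dif_neg hk, dif_pos (by omega)]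
    · rw [if_neg hk, if_neg hnk]
      have hkpos : 0 < k := by omega
      have hnpos : 0 < n := by omega
      have hkcast : ((k.toNat : Nat) : Int) = k := by omega
      by_cases hfe : k ≤ n ∧ n ≤ k * (max_val.getD n)
      · rw [pvLevels_eq k.toNat [([], n, max_val.getD n)]
            (by
              intro s hs
              simp only [List.mem_singleton] at hs
              subst hs
              simp only [hkcast]
              exact hfe)]
        simp [hkcast]
      · -- no partition exists: both sides are []
        have hA : FindIntegerPartition n k (some (max_val.getD n)) = [] := by
          apply pvA_nil k.toNat k n (max_val.getD n) (by omega)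
          omega
        rw [hA]
        obtain ⟨j, hj⟩ : ∃ j : Nat, k.toNat = j + 1 := ⟨k.toNat - 1, by omega⟩
        rw [hj, pvLevels, if_neg (by simp)]
        have hjk : ((j : Nat) : Int) + 1 = k := by omega
        have hexp : pvExpand ((j : Int) + 1) [([], n, max_val.getD n)] = [] := by
          rw [pvExpand_eq]
          obtain ⟨hc1, hc2⟩ := pvCeil n ((j : Int) + 1) (by omega)
          rw [List.flatMap_singleton]
          simp only []
          rw [PySem.List.pyRange_one_eq_nil ?_]
          · simp
          · -- empty window: lo > hi since no partition exists
            rw [hjk] at hc1 hc2 ⊢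
            by_contra hcon
            rw [not_le] at hcon
            set lo := -(PySem.Int.floordiv (-n) k) with hlodef
            have hlo1 : 1 ≤ lo := by nlinarith
            have hhim : lo ≤ min (max_val.getD n) (n - k + 1) := by omega
            have hlomv : lo ≤ max_val.getD n := by omega
            have h2 : n ≤ k * (max_val.getD n) := by nlinarith
            have h1 : k ≤ n := by omega
            exact hfe ⟨h1, h2⟩
        rw [hexp, pvLevels_nil]
        rfl
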